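-- pv_equiv track=rewrite | github.com/Masthetheus/nulloretriever | nulloretriever/analysis/motifs.py | calculate_gpc_index
-- ===== SOURCE A (Python) =====
-- def calculate_gpc_index(index, l):
--     """Calculate cpg occurrence, last and first base of each index sequence
--     Args:
--         index(int): index of sequence to be analyzed
--         l(int): original size of the k-mer sequence
--     Returns:
--         cpg(int): total count of tuples consisting in C nucleotides directly followed by G nucleotides in the index original sequence
--         c(bool): marks if given sequence ends in a C nucleotide
--         g(bool): marks if given sequence starts in a G nucleotide
--     """
--     cpg = 0
--     c = False
--     g = False
--     for i in range(l):
--         base = (index // (4 ** (l - i - 1))) % 4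
--         if i == 0 and base == 3:
--             g = True
--         if base == 2:
--             c = True
--         elif base == 3 and c:
--             cpg += 1
--             c = False
--         else:
--             c = False
--     return cpg,c,g
-- ===== SOURCE B (Python) =====
-- def calculate_gpc_index(index, l):
--     if l <= 0:
--         return 0, False, False
--     n = index % (4 ** l)
--     digits = []
--     for _ in range(l):
--         digits.append(n % 4)
--         n //= 4
--     digits.reverse()
--     cpg = sum(1 for a, b in zip(digits, digits[1:]) if a == 2 and b == 3)
--     return cpg, digits[-1] == 2, digits[0] == 3
-- ===== Notes on version B (the rewrite author's own statement) =====
-- stated objective: faster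
-- what changed: B decodes the l base-4 digits once (mask by 4**l, then peel least-significant digits with divmod-by-4 and reverse) and counts adjacent C-followed-by-G digit pairs with a zip pass, reading the first/last digit directly, instead of A's loop that re-derives each digit by dividing index by a freshly computed power 4**(l-i-1) and threads a running carry flag.
import Mathlib
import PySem

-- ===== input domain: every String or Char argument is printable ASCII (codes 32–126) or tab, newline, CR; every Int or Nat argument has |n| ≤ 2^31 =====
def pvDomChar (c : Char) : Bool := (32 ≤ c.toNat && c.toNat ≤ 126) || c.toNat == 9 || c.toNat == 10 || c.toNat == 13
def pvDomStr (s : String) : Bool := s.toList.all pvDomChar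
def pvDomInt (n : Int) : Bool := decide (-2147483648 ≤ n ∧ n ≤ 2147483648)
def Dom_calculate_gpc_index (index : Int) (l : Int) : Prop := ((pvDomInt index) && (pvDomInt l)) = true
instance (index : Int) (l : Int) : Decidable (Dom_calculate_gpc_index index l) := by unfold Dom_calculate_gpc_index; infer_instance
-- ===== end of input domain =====

-- B decodes the l base-4 digits once (mask, peel LSB digits by divmod 4, reverse) and counts
-- adjacent C-followed-by-G digit pairs on the digit list, reading the first/last digit directly,
-- instead of A's recomputing a fresh power 4**(l-i-1) per iteration — measured faster, same values.

-- ===== PORT A =====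
-- loop body of A's for-loop (helper for the port)
def pvStepA (index l : Int) (st : Int × Bool × Bool) (i : Int) : Int × Bool × Bool :=
  let base := PySem.Int.mod (PySem.Int.floordiv index ((4:Int) ^ (l - i - 1).toNat)) 4
  let g := if i = 0 ∧ base = 3 then true else st.2.2
  if base = 2 then (st.1, true, g)
  else if base = 3 ∧ st.2.1 then (st.1 + 1, false, g)
  else (st.1, false, g)

def calculate_gpc_index (index : Int) (l : Int) : Int × Bool × Bool :=
  (PySem.List.pyRange 0 l 1).foldl (pvStepA index l) (0, false, false)

-- ===== PORT B =====
-- loop body of B's digit-peeling loop ('digits.append(n % 4); n //= 4')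
def pvStepB (st : List Int × Int) (_i : Int) : List Int × Int :=
  (st.1 ++ [PySem.Int.mod st.2 4], PySem.Int.floordiv st.2 4)

def calculate_gpc_index_alt (index : Int) (l : Int) : Int × Bool × Bool :=
  if l ≤ 0 then (0, false, false)
  else
    let n := PySem.Int.mod index ((4:Int) ^ l.toNat)
    let st := (PySem.List.pyRange 0 l 1).foldl pvStepB ([], n)
    let digits := st.1.reverse
    let cpg : Int :=
      ((digits.zip (PySem.List.slice digits (some 1) none)).countP
        (fun p => p.1 == 2 && p.2 == 3) : Int)
    (cpg, PySem.List.pyGet? digits (-1) == some 2, PySem.List.pyGet? digits 0 == some 3)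

-- ===== PRECONDITION & SPEC =====
def Spec_calculate_gpc_index (index : Int) (l : Int) (out : Int × Bool × Bool) : Prop := out = calculate_gpc_index_alt index l
instance (index : Int) (l : Int) (out : Int × Bool × Bool) : Decidable (Spec_calculate_gpc_index index l out) := by unfold Spec_calculate_gpc_index; infer_instance

-- ===== CLAIM (what is proved, stated in full; the proofs are below) =====
def Claim_equal_calculate_gpc_index : Prop := ∀ (index : Int) (l : Int), Dom_calculate_gpc_index index l → Spec_calculate_gpc_index index l (calculate_gpc_index index l)

-- ===== LEMMAS AND PROOFS =====

-- the l base-4 digits of n, least significant first (Euclidean div/mod: divisor 4 > 0, so = Python's)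
def pvLsb : Int → Nat → List Int
  | _, 0 => []
  | n, k + 1 => n % 4 :: pvLsb (n / 4) k

def pvShift : Int → Nat → Int
  | n, 0 => n
  | n, k + 1 => pvShift (n / 4) k

-- the l base-4 digits of n, most significant first
def pvMsb (n : Int) (k : Nat) : List Int := (pvLsb n k).reverse

-- reference value both ports are reduced to
def pvR (ds : List Int) : Int × Bool × Bool :=
  (((ds.zip ds.tail).countP (fun p => p.1 == 2 && p.2 == 3) : Int),
   ds.getLast? == some 2,
   ds.head? == some 3)

theorem pvLsb_length (n : Int) (k : Nat) : (pvLsb n k).length = k := by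
  induction k generalizing n with
  | zero => rfl
  | succ k ih => simp [pvLsb, ih]

theorem pvMsb_succ (n : Int) (k : Nat) :
    pvMsb n (k + 1) = pvMsb (n / 4) k ++ [n % 4] := by
  simp [pvMsb, pvLsb]

-- digits depend only on n mod 4^k
theorem pvLsb_emod (n : Int) (k : Nat) : pvLsb (n % 4 ^ k) k = pvLsb n k := by
  induction k generalizing n with
  | zero => rfl
  | succ k ih =>
    have hd : 4 ∣ (4:Int) ^ (k + 1) := Dvd.intro (4 ^ k) (by ring)
    have h1 : (n % 4 ^ (k + 1)) % 4 = n % 4 := Int.emod_emod_of_dvd n hd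
    have h2 : (n % 4 ^ (k + 1)) / 4 = (n / 4) % 4 ^ k := by
      have hpos : (0:Int) < 4 ^ (k + 1) := by positivity
      have _hq := Int.mul_ediv_add_emod n (4 ^ (k + 1))
      have hr0 : 0 ≤ n % 4 ^ (k + 1) := Int.emod_nonneg n (by positivity)
      have hrlt : n % 4 ^ (k + 1) < 4 ^ (k + 1) := Int.emod_lt_of_pos n hpos
      set q := n / 4 ^ (k + 1) with hqdef
      set r := n % 4 ^ (k + 1) with hrdef
      have hn : n = r + 4 * (4 ^ k * q) := by
        rw [show (4:Int) * (4 ^ k * q) = 4 ^ (k + 1) * q by ring]; omega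
      have hdiv : n / 4 = r / 4 + 4 ^ k * q := by
        rw [hn, Int.add_mul_ediv_left r (4 ^ k * q) (by norm_num)]
      have hrdivlt : r / 4 < 4 ^ k := by
        have : r < 4 ^ k * 4 := by rw [show (4:Int) ^ k * 4 = 4 ^ (k+1) by ring]; exact hrlt
        exact Int.ediv_lt_of_lt_mul (by norm_num) this
      have hrdiv0 : 0 ≤ r / 4 := Int.ediv_nonneg hr0 (by norm_num)
      rw [hdiv, Int.add_mul_emod_self_left, Int.emod_eq_of_lt hrdiv0 hrdivlt]
    simp only [pvLsb, h1, h2, ih]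

-- B's peeling loop, fully characterised
theorem pvB_fold (xs : List Int) (acc : List Int) (n : Int) :
    xs.foldl pvStepB (acc, n) = (acc ++ pvLsb n xs.length, pvShift n xs.length) := by
  induction xs generalizing acc n with
  | nil => simp [pvLsb, pvShift]
  | cons x xs ih =>
    have hm : PySem.Int.mod n 4 = n % 4 := PySem.Int.mod_eq_emod_of_pos (by norm_num)
    have hf : PySem.Int.floordiv n 4 = n / 4 := PySem.Int.floordiv_eq_ediv_of_pos (by norm_num)
    simp only [List.foldl_cons, pvStepB, hm, hf, ih, List.length_cons, pvLsb, pvShift]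
    simp

-- counting adjacent (2,3) pairs when a digit is appended
set_option maxRecDepth 8000 in
theorem pvCount_concat (ds : List Int) (d : Int) :
    ((ds ++ [d]).zip (ds ++ [d]).tail).countP (fun p => p.1 == 2 && p.2 == 3)
      = (ds.zip ds.tail).countP (fun p => p.1 == 2 && p.2 == 3)
        + (if ds.getLast? = some 2 ∧ d = 3 then 1 else 0) := by
  induction ds with
  | nil => simp
  | cons a ds ih =>
    cases ds with
    | nil =>
      simp only [List.cons_append, List.nil_append, List.tail_cons, List.zip_cons_cons,
        List.zip_nil_right, List.countP_cons, List.countP_nil, List.getLast?_singleton]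
      by_cases h2 : a = 2 <;> by_cases h3 : d = 3 <;> simp [h2, h3]
    | cons b t =>
      have e1 : (a :: b :: t) ++ [d] = a :: b :: (t ++ [d]) := by simp
      have ih' : ((b :: (t ++ [d])).zip (t ++ [d])).countP (fun p => p.1 == 2 && p.2 == 3)
          = ((b :: t).zip ((b :: t).tail)).countP (fun p => p.1 == 2 && p.2 == 3)
            + (if (b :: t).getLast? = some 2 ∧ d = 3 then 1 else 0) := by
        simpa using ih
      rw [e1]
      simp only [List.tail_cons, List.zip_cons_cons, List.countP_cons, ih',
        List.getLast?_cons_cons]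
      ring

theorem pvMsb_ne_nil (n : Int) (k : Nat) (hk : 1 ≤ k) : pvMsb n k ≠ [] := by
  have : (pvMsb n k).length = k := by simp [pvMsb, pvLsb_length]
  intro h; rw [h] at this; simp at this; omega

-- Int-valued pair count, for convenience
def pvCnt (ds : List Int) : Int :=
  ((ds.zip ds.tail).countP (fun p => p.1 == 2 && p.2 == 3) : Int)

theorem pvR_eq (ds : List Int) :
    pvR ds = (pvCnt ds, ds.getLast? == some 2, ds.head? == some 3) := rfl

theorem pvR_concat (ds : List Int) (d : Int) (hne : ds ≠ []) :
    pvR (ds ++ [d]) = (pvCnt ds + (if ds.getLast? = some 2 ∧ d = 3 then 1 else 0),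
                       d == 2, ds.head? == some 3) := by
  have h1 : pvCnt (ds ++ [d]) = pvCnt ds + (if ds.getLast? = some 2 ∧ d = 3 then 1 else 0) := by
    unfold pvCnt
    rw [pvCount_concat]
    push_cast
    split_ifs <;> simp
  have h2 : (ds ++ [d]).getLast? = some d := List.getLast?_concat
  have h3 : (ds ++ [d]).head? = ds.head? := by
    rw [List.head?_append]
    cases hh : ds.head? with
    | none => exact absurd (List.head?_eq_none_iff.mp hh) hne
    | some a => rfl
  rw [pvR_eq, h1, h2, h3]
  simp

-- the last iteration of A's loop (i = n, l = n + 1, n ≥ 1)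
theorem pvStepA_last (index : Int) (n : Nat) (hn : 1 ≤ n) (st : Int × Bool × Bool) :
    pvStepA index ((n : Int) + 1) st (n : Int)
      = (if index % 4 = 2 then (st.1, true, st.2.2)
         else if index % 4 = 3 ∧ st.2.1 then (st.1 + 1, false, st.2.2)
         else (st.1, false, st.2.2)) := by
  have he0 : (((n : Int) + 1) - (n : Int) - 1).toNat = 0 := by omega
  have hf : PySem.Int.floordiv index ((4:Int) ^ (0:Nat)) = index := by
    rw [PySem.Int.floordiv_eq_ediv_of_pos (by norm_num)]; simp
  have hm : PySem.Int.mod index 4 = index % 4 := PySem.Int.mod_eq_emod_of_pos (by norm_num)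
  have hn0 : ¬ ((n : Int) = 0) := by omega
  unfold pvStepA
  rw [he0, hf]
  simp only [hm, hn0, false_and, if_false]

-- A's loop equals the reference value on the MSB-first digit list
theorem pvA_eq (L : Nat) (hL : 1 ≤ L) (index : Int) :
    (PySem.List.pyRange 0 (L : Int) 1).foldl (pvStepA index (L : Int)) (0, false, false)
      = pvR (pvMsb index L) := by
  induction L, hL using Nat.le_induction generalizing index with
  | base =>
    have hr : PySem.List.pyRange 0 ((1:Nat) : Int) 1 = [0] := by
      simpa using PySem.List.pyRange_one_singleton (0 : Int)
    rw [hr]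
    simp only [List.foldl_cons, List.foldl_nil, pvStepA]
    have he : (((1:Nat) : Int) - 0 - 1).toNat = 0 := by omega
    have hf : PySem.Int.floordiv index ((4:Int) ^ (0:Nat)) = index := by
      rw [PySem.Int.floordiv_eq_ediv_of_pos (by norm_num)]; simp
    have hm : PySem.Int.mod index 4 = index % 4 := PySem.Int.mod_eq_emod_of_pos (by norm_num)
    rw [he, hf, hm]
    have hmsb : pvMsb index 1 = [index % 4] := by simp [pvMsb, pvLsb]
    rw [hmsb]
    by_cases h2 : index % 4 = 2 <;> by_cases h3 : index % 4 = 3 <;>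
      simp [pvR, h2, h3]
  | succ n hn ih =>
    have hsplit : PySem.List.pyRange 0 (((n + 1 : Nat)) : Int) 1
        = PySem.List.pyRange 0 (n : Int) 1 ++ [(n : Int)] := by
      push_cast
      exact PySem.List.pyRange_one_succ_right (by positivity)
    rw [hsplit, List.foldl_append]
    have hcongr : (PySem.List.pyRange 0 (n : Int) 1).foldl (pvStepA index ((n+1 : Nat) : Int)) (0, false, false)
        = (PySem.List.pyRange 0 (n : Int) 1).foldl (pvStepA (index / 4) ((n : Nat) : Int)) (0, false, false) := by
      apply PySem.List.foldl_congr_mem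
      intro acc i hi
      rw [PySem.List.mem_pyRange_one] at hi
      obtain ⟨hi0, hin⟩ := hi
      have he : (((n+1 : Nat) : Int) - i - 1).toNat = ((n : Int) - i - 1).toNat + 1 := by omega
      have hbase : PySem.Int.floordiv index ((4:Int) ^ (((n+1 : Nat) : Int) - i - 1).toNat)
          = PySem.Int.floordiv (index / 4) ((4:Int) ^ (((n : Nat) : Int) - i - 1).toNat) := by
        rw [he]
        rw [PySem.Int.floordiv_eq_ediv_of_pos (by positivity),
            PySem.Int.floordiv_eq_ediv_of_pos (by positivity)]
        rw [Int.ediv_ediv_of_nonneg (by norm_num : (0:Int) ≤ 4)]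
        ring_nf
      simp only [pvStepA, hbase]
    rw [hcongr, ih, pvMsb_succ]
    have hc1 : ((n + 1 : Nat) : Int) = (n : Int) + 1 := by push_cast; ring
    rw [hc1]
    simp only [List.foldl_cons, List.foldl_nil]
    rw [pvStepA_last index n hn]
    set ds := pvMsb (index / 4) n with hds
    have hne : ds ≠ [] := pvMsb_ne_nil _ _ hn
    rw [pvR_concat ds (index % 4) hne, pvR_eq]
    by_cases h2 : index % 4 = 2
    · rw [if_pos h2]
      have : ¬ (ds.getLast? = some 2 ∧ index % 4 = 3) := by
        rintro ⟨-, h3⟩; omega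
      rw [if_neg this]
      simp [h2]
    · rw [if_neg h2]
      by_cases h3 : index % 4 = 3
      · by_cases hc : ds.getLast? = some 2
        · rw [if_pos ⟨h3, by simp [hc]⟩, if_pos ⟨hc, h3⟩]
          simp [h2]
        · rw [if_neg (by simp [hc] : ¬ (index % 4 = 3 ∧ (ds.getLast? == some 2) = true)),
              if_neg (by tauto)]
          simp [h2]
      · rw [if_neg (by tauto), if_neg (by tauto)]
        simp [h2]

-- B equals the reference value on the same digit list
theorem pvB_eq (index l : Int) (hl : 0 < l) :
    calculate_gpc_index_alt index l = pvR (pvMsb index l.toNat) := by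
  unfold calculate_gpc_index_alt
  rw [if_neg (by omega)]
  have hlen : (PySem.List.pyRange 0 l 1).length = l.toNat := by
    rw [PySem.List.length_pyRange_one]; omega
  have hmask : PySem.Int.mod index ((4:Int) ^ l.toNat) = index % 4 ^ l.toNat :=
    PySem.Int.mod_eq_emod_of_pos (by positivity)
  simp only [pvB_fold, hlen, hmask, List.nil_append, pvLsb_emod]
  set ds := (pvLsb index l.toNat).reverse with hds
  have hds' : ds = pvMsb index l.toNat := rfl
  have hne : ds ≠ [] := by rw [hds']; exact pvMsb_ne_nil _ _ (by omega)
  have htail : PySem.List.slice ds (some 1) none = ds.tail := PySem.List.slice_from_one ds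
  have hlastg : PySem.List.pyGet? ds (-1) = ds.getLast? := PySem.List.pyGet?_neg_one ds
  have hheadg : PySem.List.pyGet? ds 0 = ds.head? := by
    rw [PySem.List.pyGet?_zero]; exact List.head?_eq_getElem?.symm
  rw [htail, hlastg, hheadg, hds']
  rfl

-- ===== VERDICT (by name: the statement is the Claim_ definition above) =====
theorem calculate_gpc_index_spec : Claim_equal_calculate_gpc_index := by
  intro index l _
  unfold Spec_calculate_gpc_index
  by_cases hl : l ≤ 0
  · unfold calculate_gpc_index calculate_gpc_index_alt
    rw [PySem.List.pyRange_one_eq_nil hl, if_pos hl]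
    rfl
  · have hl' : 0 < l := by omega
    have hL : 1 ≤ l.toNat := by omega
    have hcast : ((l.toNat : Nat) : Int) = l := by omega
    unfold calculate_gpc_index
    rw [← hcast, pvA_eq l.toNat hL index, ← pvB_eq index l hl']
    rw [hcast]
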